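-- pv_equiv track=rewrite | github.com/cbw6088/CodingTraining | JY/11월 2주차/택배상자.py | solution
-- ===== SOURCE A (Python) =====
-- from collections import deque
--
-- def solution(order):
--     answer = 0
--     dq = deque()
--
--     # STEP0. 1번부터~ N번까지 삽입
--     for i in range(1, len(order)+1):
--         dq.append(i)
--
--     while len(dq) > 0:
--         front = dq[0]
--         back = dq[-1]
--
--         if order[answer] == front:
--             dq.popleft()
--             answer +=1
--         elif order[answer] == back:
--             dq.pop()
--             answer +=1
--         elif order[answer] > front:
--             dq.append(dq.popleft()) #-- 뒤에 삽입
--         else: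
--             break
--     # 마지막 처리
--
--     return answer
-- ===== SOURCE B (Python) =====
-- def solution(order):
--     # Direct pointer-on-sorted-remaining simulation: A's deque is always a rotation
--     # of the sorted remaining boxes, so we keep the sorted list s and a pointer p
--     # (the deque's front) and jump straight to the target instead of rotating.
--     n = len(order)
--     s = list(range(1, n + 1))
--     p = 1
--     answer = 0
--     while s:
--         t = order[answer]
--         if t == p:
--             s.remove(p)
--             if s:
--                 p = next((x for x in s if x > p), s[0])
--         elif t == next((x for x in reversed(s) if x < p), s[-1]):
--             s.remove(t)
--         elif t > p and t in s:
--             s.remove(t)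
--             p = next((x for x in s if x > t), s[0])
--         else:
--             break
--         answer += 1
--     return answer
-- ===== Notes on version B (the rewrite author's own statement) =====
-- stated objective: alternative
-- what changed: Replaces the deque simulation (rotate one box at a time until the target reaches the front) by a pointer into the sorted remaining list: since A's deque is always a rotation of the sorted remaining boxes, B keeps just that sorted list and the front pointer and removes the target directly, so the inner rotation loop disappears.
-- outside the precondition, e.g. on solution([2, 2, 1]): A returns 1, B returns 1; on solution([1, 1]): A returns 1, B returns 1; on solution([2]): A does not finish within the time limit, B returns 0
import Mathlib
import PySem

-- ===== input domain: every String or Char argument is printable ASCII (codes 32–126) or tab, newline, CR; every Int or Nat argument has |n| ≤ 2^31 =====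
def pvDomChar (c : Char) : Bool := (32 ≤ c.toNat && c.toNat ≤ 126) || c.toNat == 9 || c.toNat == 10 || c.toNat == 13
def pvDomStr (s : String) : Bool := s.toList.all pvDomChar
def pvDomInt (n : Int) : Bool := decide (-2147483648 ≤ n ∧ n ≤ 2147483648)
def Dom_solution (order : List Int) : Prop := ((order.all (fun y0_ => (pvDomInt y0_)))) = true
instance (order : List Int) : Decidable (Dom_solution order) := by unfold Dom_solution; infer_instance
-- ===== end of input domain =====

-- B replaces A's deque-rotation simulation by a pointer on the sorted remaining list that jumps
-- straight to the target box, removing the inner one-box-at-a-time rotation loop (objective: alternative).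

-- ===== PORT A =====
-- A's while loop; the fuel counter only makes the recursion total (the amount passed at the top
-- call is proved sufficient for every input admitted by Pre_solution; Python itself has no fuel).
def loopA (order : List Int) : Nat → List Int → Int → Int
  | 0, _, ans => ans
  | _ + 1, [], ans => ans
  | fuel + 1, q :: qs, ans =>
    let front := q                                      -- dq[0]
    let back := PySem.List.pyGetD (q :: qs) (-1) 0      -- dq[-1] (dq nonempty here, so exact)
    let t := PySem.List.pyGetD order ans 0              -- order[answer]; in range whenever the loop runs (len(dq) = N - answer)
    if t = front then loopA order fuel qs (ans + 1)
    else if t = back then loopA order fuel (q :: qs).dropLast (ans + 1)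
    else if front < t then loopA order fuel (qs ++ [q]) ans
    else ans

def solution (order : List Int) : Int :=
  let n := order.length
  let dq := PySem.List.pyRange 1 ((n : Int) + 1) 1      -- STEP0: append 1..N
  loopA order (n * n + n + 1) dq 0

-- ===== PORT B =====
-- next((x for x in s if x > v), s[0])  (Source B evaluates the default only with s nonempty)
def bSucc (s : List Int) (v : Int) : Int :=
  (s.find? (fun x => decide (v < x))).getD (PySem.List.pyGetD s 0 0)

-- next((x for x in reversed(s) if x < v), s[-1])  (Source B calls this only with s nonempty)
def bPred (s : List Int) (v : Int) : Int :=
  (s.reverse.find? (fun x => decide (x < v))).getD (PySem.List.pyGetD s (-1) 0)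

-- Source B's while loop; fuel = initial length of s (each iteration removes one element of s or
-- returns, so the fuel never runs out while s is nonempty).
def loopB (order : List Int) : Nat → List Int → Int → Int → Int
  | 0, _, _, ans => ans
  | fuel + 1, s, p, ans =>
    if s = [] then ans
    else
      let t := PySem.List.pyGetD order ans 0            -- order[answer]
      if t = p then
        let s' := s.erase p
        loopB order fuel s' (if s' = [] then p else bSucc s' p) (ans + 1)
      else if t = bPred s p then
        loopB order fuel (s.erase t) p (ans + 1)
      else if p < t ∧ t ∈ s then
        let s' := s.erase t
        loopB order fuel s' (bSucc s' t) (ans + 1)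
      else ans

def solution_alt (order : List Int) : Int :=
  let n := order.length
  loopB order n (PySem.List.pyRange 1 ((n : Int) + 1) 1) 1 0

-- ===== PRECONDITION & SPEC =====
-- Pre_ admits the problem's stated domain — order is a permutation of 1..N — and additionally every
-- list whose first request is below box 1 (there A breaks out immediately with 0).  The remaining
-- non-permutation inputs are excluded because on them A's rotation loop can cycle forever (e.g. on
-- [2] the target never appears in the deque), so A often has no value at all there; on such inputs
-- where A does break out and return, nothing is claimed (see cites in the claim).
def Pre_solution (order : List Int) : Prop :=
  order.Perm (PySem.List.pyRange 1 ((order.length : Int) + 1) 1) ∨ order.head?.getD 1 < 1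
instance (order : List Int) : Decidable (Pre_solution order) := by unfold Pre_solution; infer_instance

def pvWitness_solution : List Int := [3, 1, 4, 2]

def Spec_solution (order : List Int) (out : Int) : Prop := out = solution_alt order
instance (order : List Int) (out : Int) : Decidable (Spec_solution order out) := by unfold Spec_solution; infer_instance

-- ===== CLAIM (what is proved, stated in full; the proofs are below) =====
def Claim_equal_solution : Prop := ∀ (order : List Int), Dom_solution order → Pre_solution order → Spec_solution order (solution order)

-- ===== LEMMAS AND PROOFS =====

-- A's deque is, at every step, a rotation of the sorted list s of remaining boxes cut at the
-- current front p; rot makes that explicit.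
def rot (s : List Int) (p : Int) : List Int :=
  s.filter (fun x => decide (p ≤ x)) ++ s.filter (fun x => decide (x < p))

theorem filter_ge_eq_cons {s : List Int} {p : Int} (hs : List.Pairwise (· < ·) s) (hp : p ∈ s) :
    s.filter (fun x => decide (p ≤ x)) = p :: s.filter (fun x => decide (p < x)) := by
  induction s with
  | nil => cases hp
  | cons a tl ih =>
    rcases List.mem_cons.mp hp with h | h
    · subst h
      rw [List.filter_cons, List.filter_cons, if_pos (by simp), if_neg (by simp)]
      congr 1
      apply List.filter_congr
      intro x hx
      have := List.rel_of_pairwise_cons hs hx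
      simp [le_of_lt this, this]
    · have hap : a < p := List.rel_of_pairwise_cons hs h
      rw [List.filter_cons, List.filter_cons, if_neg (by simp; omega), if_neg (by simp; omega)]
      exact ih hs.of_cons h

theorem filter_le_eq_append {s : List Int} {p : Int} (hs : List.Pairwise (· < ·) s) (hp : p ∈ s) :
    s.filter (fun x => decide (x ≤ p)) = s.filter (fun x => decide (x < p)) ++ [p] := by
  induction s with
  | nil => cases hp
  | cons a tl ih =>
    rcases List.mem_cons.mp hp with h | h
    · subst h
      rw [List.filter_cons, List.filter_cons, if_pos (by simp), if_neg (by simp)]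
      have h1 : tl.filter (fun x => decide (x ≤ p)) = [] := by
        apply List.filter_eq_nil_iff.mpr
        intro x hx
        have := List.rel_of_pairwise_cons hs hx
        simp; omega
      have h2 : tl.filter (fun x => decide (x < p)) = [] := by
        apply List.filter_eq_nil_iff.mpr
        intro x hx
        have := List.rel_of_pairwise_cons hs hx
        simp; omega
      simp [h1, h2]
    · have hap : a < p := List.rel_of_pairwise_cons hs h
      rw [List.filter_cons, List.filter_cons, if_pos (by simp; omega), if_pos (by simp; omega)]
      rw [ih hs.of_cons h]
      simp

theorem rot_cons {s : List Int} {p : Int} (hs : List.Pairwise (· < ·) s) (hp : p ∈ s) :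
    rot s p = p :: (s.filter (fun x => decide (p < x)) ++ s.filter (fun x => decide (x < p))) := by
  unfold rot
  rw [filter_ge_eq_cons hs hp, List.cons_append]

theorem succ_filters {s : List Int} {p p' : Int} {r : List Int}
    (hs : List.Pairwise (· < ·) s)
    (h : s.filter (fun x => decide (p < x)) = p' :: r) :
    s.filter (fun x => decide (p' ≤ x)) = s.filter (fun x => decide (p < x)) ∧
    s.filter (fun x => decide (x < p')) = s.filter (fun x => decide (x ≤ p)) := by
  have hmem : p' ∈ s := by
    have : p' ∈ s.filter (fun x => decide (p < x)) := by rw [h]; exact List.mem_cons_self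
    exact List.mem_of_mem_filter this
  have hpp' : p < p' := by
    have : p' ∈ s.filter (fun x => decide (p < x)) := by rw [h]; exact List.mem_cons_self
    simpa using List.of_mem_filter this
  have hmin : ∀ x ∈ s, p < x → p' ≤ x := by
    intro x hx hpx
    have hxf : x ∈ s.filter (fun x => decide (p < x)) := List.mem_filter.mpr ⟨hx, by simpa⟩
    rw [h] at hxf
    rcases List.mem_cons.mp hxf with h' | h'
    · omega
    · have hsf : List.Pairwise (· < ·) (s.filter (fun x => decide (p < x))) := hs.filter _
      rw [h] at hsf
      exact le_of_lt (List.rel_of_pairwise_cons hsf h')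
  constructor
  · apply List.filter_congr
    intro x hx
    by_cases hc : p < x
    · simp [hc, hmin x hx hc]
    · have : ¬ p' ≤ x := by omega
      simp [hc, this]
  · apply List.filter_congr
    intro x hx
    by_cases hc : p < x
    · have := hmin x hx hc
      simp; omega
    · simp; omega

theorem bPred_of_filter_ne_nil {s : List Int} {v : Int}
    (h : s.filter (fun x => decide (x < v)) ≠ []) :
    bPred s v = (s.filter (fun x => decide (x < v))).getLast h := by
  unfold bPred
  rw [← List.getLast?_filter, List.getLast?_eq_some_getLast h]
  rfl

theorem bPred_of_filter_nil {s : List Int} {v : Int} (hne : s ≠ [])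
    (h : s.filter (fun x => decide (x < v)) = []) :
    bPred s v = s.getLast hne := by
  unfold bPred
  rw [← List.getLast?_filter, h]
  simp [PySem.List.pyGetD_neg_one (h := hne)]

theorem bPred_mem {s : List Int} {v : Int} (hne : s ≠ []) : bPred s v ∈ s := by
  by_cases h : s.filter (fun x => decide (x < v)) = []
  · rw [bPred_of_filter_nil hne h]
    exact List.getLast_mem hne
  · rw [bPred_of_filter_ne_nil h]
    exact List.mem_of_mem_filter (List.getLast_mem h)

theorem getD_zero_mem {s : List Int} (hne : s ≠ []) : s.getD 0 0 ∈ s := by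
  cases s with
  | nil => simp at hne
  | cons a tl => simp

theorem bSucc_mem {s : List Int} {v : Int} (hne : s ≠ []) : bSucc s v ∈ s := by
  unfold bSucc
  cases hf : s.find? (fun x => decide (v < x)) with
  | none => simpa [PySem.List.pyGetD_zero] using getD_zero_mem hne
  | some x => simpa using List.mem_of_find?_eq_some hf

theorem head_min_of_sorted {s : List Int} (hs : List.Pairwise (· < ·) s) :
    ∀ x ∈ s, s.getD 0 0 ≤ x := by
  cases s with
  | nil => simp
  | cons a tl =>
    intro x hx
    rcases List.mem_cons.mp hx with h | h
    · simp [h]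
    · simpa using le_of_lt (List.rel_of_pairwise_cons hs h)

theorem erase_getLast_of_nodup : ∀ (l : List Int), l.Nodup → ∀ (hne : l ≠ []),
    l.erase (l.getLast hne) = l.dropLast := by
  intro l
  induction l with
  | nil => intro _ h; simp at h
  | cons a tl ih =>
    intro hnd hne
    cases tl with
    | nil => simp
    | cons b tl' =>
      have hlast : (a :: b :: tl').getLast hne = (b :: tl').getLast (by simp) := by
        simp [List.getLast_cons]
      rw [hlast]
      have hane : a ≠ (b :: tl').getLast (by simp) := by
        intro hcontra
        exact (List.nodup_cons.mp hnd).1 (hcontra ▸ List.getLast_mem (by simp))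
      rw [List.erase_cons, if_neg (by simpa using hane)]
      rw [ih (List.nodup_cons.mp hnd).2 (by simp)]
      rfl



theorem back_eq_bPred {s : List Int} {p : Int} (hs : List.Pairwise (· < ·) s) (hp : p ∈ s) :
    PySem.List.pyGetD (rot s p) (-1) 0 = bPred s p := by
  have hne : rot s p ≠ [] := by rw [rot_cons hs hp]; simp
  rw [PySem.List.pyGetD_neg_one (h := hne)]
  by_cases h : s.filter (fun x => decide (x < p)) = []
  · have hall : s.filter (fun x => decide (p ≤ x)) = s := by
      apply List.filter_eq_self.mpr
      intro x hx
      have := List.filter_eq_nil_iff.mp h x hx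
      simp at this ⊢; omega
    rw [bPred_of_filter_nil (by rintro rfl; cases hp) h]
    have hr : rot s p = s := by unfold rot; rw [hall, h]; simp
    simp only [hr]
  · rw [bPred_of_filter_ne_nil h]
    have h2 : (rot s p).getLast? = (s.filter (fun x => decide (x < p))).getLast? :=
      List.getLast?_append_of_ne_nil _ h
    rw [List.getLast?_eq_some_getLast hne, List.getLast?_eq_some_getLast h] at h2
    exact Option.some.inj h2

theorem popFront {s : List Int} {p : Int} (hs : List.Pairwise (· < ·) s) (hp : p ∈ s)
    (hne : s.erase p ≠ []) :
    s.filter (fun x => decide (p < x)) ++ s.filter (fun x => decide (x < p)) =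
      rot (s.erase p) (bSucc (s.erase p) p) := by
  have hnd : s.Nodup := hs.imp ne_of_lt
  have he : s.erase p = s.filter (fun x => x != p) := List.Nodup.erase_eq_filter hnd p
  have hes : List.Pairwise (· < ·) (s.erase p) := hs.erase p
  have E1 : (s.erase p).filter (fun x => decide (p < x)) = s.filter (fun x => decide (p < x)) := by
    rw [he, List.filter_filter]
    apply List.filter_congr; intro x hx
    by_cases h1 : x = p <;> by_cases h2 : p < x <;> simp [h1, h2] <;> omega
  have E2 : (s.erase p).filter (fun x => decide (x < p)) = s.filter (fun x => decide (x < p)) := by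
    rw [he, List.filter_filter]
    apply List.filter_congr; intro x hx
    by_cases h1 : x = p <;> by_cases h2 : x < p <;> simp [h1, h2] <;> omega
  have E3 : (s.erase p).filter (fun x => decide (x ≤ p)) = s.filter (fun x => decide (x < p)) := by
    rw [he, List.filter_filter]
    apply List.filter_congr; intro x hx
    by_cases h1 : x = p <;> by_cases h2 : x < p <;> simp [h1, h2] <;> omega
  cases hF : (s.erase p).filter (fun x => decide (p < x)) with
  | cons p' r =>
      have hfind : bSucc (s.erase p) p = p' := by
        unfold bSucc
        rw [← List.head?_filter, hF]
        rfl
      rw [hfind]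
      unfold rot
      obtain ⟨h1, h2⟩ := succ_filters hes hF
      rw [h1, h2, hF, ← E1, hF, E3]
  | nil =>
      have hF' : s.filter (fun x => decide (p < x)) = [] := by rw [← E1, hF]
      have heq : s.erase p = s.filter (fun x => decide (x < p)) := by
        rw [he]
        apply List.filter_congr; intro x hx
        have hxle : ¬ p < x := by simpa using List.filter_eq_nil_iff.mp hF' x hx
        by_cases hxp : x = p
        · simp [hxp]
        · have hlt : x < p := by omega
          simp [hxp, hlt]
      have hsucc : bSucc (s.erase p) p = (s.erase p).getD 0 0 := by
        unfold bSucc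
        rw [← List.head?_filter, hF]
        simp [PySem.List.pyGetD_zero]
      rw [hsucc]
      unfold rot
      have g1 : (s.erase p).filter (fun x => decide ((s.erase p).getD 0 0 ≤ x)) = s.erase p := by
        apply List.filter_eq_self.mpr
        intro x hx
        simp only [decide_eq_true_eq]
        exact head_min_of_sorted hes x hx
      have g2 : (s.erase p).filter (fun x => decide (x < (s.erase p).getD 0 0)) = [] := by
        apply List.filter_eq_nil_iff.mpr
        intro x hx
        have := head_min_of_sorted hes x hx
        simp only [decide_eq_true_eq, not_lt]
        omega
      rw [g1, g2, hF', heq]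
      simp

theorem popBack {s : List Int} {p : Int} (hs : List.Pairwise (· < ·) s) (hp : p ∈ s)
    (hne : bPred s p ≠ p) :
    (rot s p).dropLast = rot (s.erase (bPred s p)) p := by
  have hnd : s.Nodup := hs.imp ne_of_lt
  have hsne : s ≠ [] := by rintro rfl; cases hp
  by_cases h : s.filter (fun x => decide (x < p)) = []
  · have ht : bPred s p = s.getLast hsne := bPred_of_filter_nil hsne h
    have hall : s.filter (fun x => decide (p ≤ x)) = s := by
      apply List.filter_eq_self.mpr
      intro x hx
      have := List.filter_eq_nil_iff.mp h x hx
      simp at this ⊢; omega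
    have hr : rot s p = s := by unfold rot; rw [hall, h]; simp
    rw [hr, ht, erase_getLast_of_nodup s hnd hsne]
    have hsub : (s.dropLast).Sublist s := List.dropLast_sublist s
    have hall2 : (s.dropLast).filter (fun x => decide (p ≤ x)) = s.dropLast := by
      apply List.filter_eq_self.mpr
      intro x hx
      have := List.filter_eq_nil_iff.mp h x (hsub.mem hx)
      simp at this ⊢; omega
    have h2 : (s.dropLast).filter (fun x => decide (x < p)) = [] := by
      apply List.filter_eq_nil_iff.mpr
      intro x hx
      exact List.filter_eq_nil_iff.mp h x (hsub.mem hx)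
    unfold rot
    rw [hall2, h2]
    simp
  · set L := s.filter (fun x => decide (x < p)) with hL
    have ht : bPred s p = L.getLast h := bPred_of_filter_ne_nil h
    have htL : bPred s p ∈ L := ht ▸ List.getLast_mem h
    have htlt : bPred s p < p := by simpa using List.of_mem_filter htL
    have hLnd : L.Nodup := hnd.filter _
    have he : s.erase (bPred s p) = s.filter (fun x => x != bPred s p) :=
      List.Nodup.erase_eq_filter hnd _
    unfold rot
    rw [List.dropLast_append_of_ne_nil h]
    congr 1
    · rw [he, List.filter_filter]
      apply List.filter_congr; intro x hx
      by_cases h1 : x = bPred s p <;> simp [h1] <;> omega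
    · rw [he, List.filter_filter]
      have : s.filter (fun x => decide (x < p) && (x != bPred s p)) = L.filter (fun x => x != bPred s p) := by
        rw [hL, List.filter_filter]
        apply List.filter_congr; intro x hx
        exact Bool.and_comm _ _
      rw [this, ← List.Nodup.erase_eq_filter hLnd, ht, erase_getLast_of_nodup L hLnd h]

theorem rotA (order : List Int) (ans : Int) : ∀ (k fuel : Nat) (s : List Int) (p t : Int),
    List.Pairwise (· < ·) s → p ∈ s → t ∈ s → p ≤ t → t ≠ bPred s p →
    PySem.List.pyGetD order ans 0 = t →
    (s.filter (fun x => decide (p ≤ x) && decide (x < t))).length = k →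
    loopA order (fuel + k + 1) (rot s p) ans = loopA order (fuel + 1) (rot s t) ans := by
  intro k
  induction k with
  | zero =>
    intro fuel s p t hs hp ht hpt hb hget hlen
    have hpt' : p = t := by
      by_contra hne
      have hplt : p < t := lt_of_le_of_ne hpt hne
      have hmem : p ∈ s.filter (fun x => decide (p ≤ x) && decide (x < t)) :=
        List.mem_filter.mpr ⟨hp, by simp [hplt]⟩
      rw [List.length_eq_zero_iff.mp hlen] at hmem
      cases hmem
    subst hpt'; rfl
  | succ k ih =>
    intro fuel s p t hs hp ht hpt hb hget hlen
    have hne : p ≠ t := by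
      rintro rfl
      have hnil : s.filter (fun x => decide (p ≤ x) && decide (x < p)) = [] := by
        apply List.filter_eq_nil_iff.mpr; intro x hx
        simp only [Bool.and_eq_true, decide_eq_true_eq, not_and]; omega
      rw [hnil] at hlen; simp at hlen
    have hplt : p < t := lt_of_le_of_ne hpt hne
    have htf : t ∈ s.filter (fun x => decide (p < x)) := List.mem_filter.mpr ⟨ht, by simp [hplt]⟩
    obtain ⟨p', r, hF⟩ : ∃ p' r, s.filter (fun x => decide (p < x)) = p' :: r := by
      cases hFc : s.filter (fun x => decide (p < x)) with
      | nil => rw [hFc] at htf; cases htf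
      | cons a b => exact ⟨a, b, rfl⟩
    obtain ⟨h1, h2⟩ := succ_filters hs hF
    have hp'mem : p' ∈ s := List.mem_of_mem_filter (hF ▸ List.mem_cons_self)
    have hpp' : p < p' := by
      simpa using List.of_mem_filter (show p' ∈ s.filter (fun x => decide (p < x)) from hF ▸ List.mem_cons_self)
    have hp't : p' ≤ t := by
      have hsf : List.Pairwise (· < ·) (p' :: r) := hF ▸ hs.filter _
      rcases List.mem_cons.mp (hF ▸ htf) with h' | h'
      · omega
      · exact le_of_lt (List.rel_of_pairwise_cons hsf h')
    have hfne : s.filter (fun x => decide (x < p')) ≠ [] := by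
      rw [h2, filter_le_eq_append hs hp]; simp
    have hbp' : bPred s p' = p := by
      rw [bPred_of_filter_ne_nil hfne]
      have hgl : (s.filter (fun x => decide (x < p'))).getLast? = some p := by
        rw [h2, filter_le_eq_append hs hp]
        simp
      rw [List.getLast?_eq_some_getLast hfne] at hgl
      exact Option.some.inj hgl
    have hmin : ∀ x ∈ s, p < x → p' ≤ x := by
      intro x hx hpx
      have hxf : x ∈ s.filter (fun x => decide (p < x)) := List.mem_filter.mpr ⟨hx, by simpa⟩
      rw [hF] at hxf
      rcases List.mem_cons.mp hxf with h' | h'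
      · omega
      · have hsf : List.Pairwise (· < ·) (p' :: r) := hF ▸ hs.filter _
        exact le_of_lt (List.rel_of_pairwise_cons hsf h')
    have eL : s.filter (fun x => decide (p ≤ x) && decide (x < t)) =
        (s.filter (fun x => decide (x < t))).filter (fun x => decide (p ≤ x)) :=
      List.filter_filter.symm
    have eR : s.filter (fun x => decide (p' ≤ x) && decide (x < t)) =
        (s.filter (fun x => decide (x < t))).filter (fun x => decide (p' ≤ x)) :=
      List.filter_filter.symm
    have hs' : List.Pairwise (· < ·) (s.filter (fun x => decide (x < t))) := hs.filter _
    have hps' : p ∈ s.filter (fun x => decide (x < t)) := List.mem_filter.mpr ⟨hp, by simpa⟩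
    have e2 : (s.filter (fun x => decide (x < t))).filter (fun x => decide (p ≤ x)) =
        p :: (s.filter (fun x => decide (x < t))).filter (fun x => decide (p' ≤ x)) := by
      rw [filter_ge_eq_cons hs' hps']
      congr 1
      apply List.filter_congr; intro x hx
      have hxs : x ∈ s := List.mem_of_mem_filter hx
      by_cases hc : p < x
      · have := hmin x hxs hc
        simp [hc, this]
      · have h2' : ¬ p' ≤ x := by omega
        simp [hc, h2']
    have hlen' : (s.filter (fun x => decide (p' ≤ x) && decide (x < t))).length = k := by
      rw [eL, e2] at hlen
      rw [eR]
      simpa using hlen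
    -- one rotation step of loopA
    rw [rot_cons hs hp]
    show loopA order (fuel + k + 1 + 1) _ _ = _
    simp only [loopA]
    rw [hget]
    rw [if_neg (by omega)]
    rw [show PySem.List.pyGetD (p :: (List.filter (fun x => decide (p < x)) s ++ List.filter (fun x => decide (x < p)) s)) (-1) 0 = bPred s p from by rw [← rot_cons hs hp]; exact back_eq_bPred hs hp]
    rw [if_neg hb, if_pos hplt]
    have hr : (List.filter (fun x => decide (p < x)) s ++ List.filter (fun x => decide (x < p)) s) ++ [p] = rot s p' := by
      rw [List.append_assoc, ← filter_le_eq_append hs hp]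
      unfold rot
      rw [h1, h2]
    rw [hr]
    exact ih fuel s p' t hs hp'mem ht hp't (by rw [hbp']; omega) hget hlen'

theorem mainEq (order : List Int) : ∀ (n : Nat) (s : List Int) (p ans : Int) (fuel : Nat),
    s.length = n → List.Pairwise (· < ·) s → (s = [] ∨ p ∈ s) → 0 ≤ ans →
    (order.drop ans.toNat).Perm s → ans.toNat + n = order.length →
    n * n + 1 ≤ fuel →
    loopA order fuel (rot s p) ans = loopB order n s p ans := by
  intro n
  induction n with
  | zero =>
    intro s p ans fuel hlen hs hp hans hperm hcnt hfuel
    have hnil : s = [] := List.length_eq_zero_iff.mp hlen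
    subst hnil
    obtain ⟨f, rfl⟩ : ∃ f, fuel = f + 1 := ⟨fuel - 1, by omega⟩
    simp [rot, loopA, loopB]
  | succ n ih =>
    intro s p ans fuel hlen hs hp hans hperm hcnt hfuel
    have hsne : s ≠ [] := by intro h; rw [h] at hlen; simp at hlen
    have hpmem : p ∈ s := hp.resolve_left hsne
    obtain ⟨f, rfl⟩ : ∃ f, fuel = f + 1 := ⟨fuel - 1, by omega⟩
    have hidx : ans.toNat < order.length := by omega
    have hdrop : order.drop ans.toNat = order[ans.toNat] :: order.drop (ans.toNat + 1) :=
      List.drop_eq_getElem_cons hidx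
    have hget : PySem.List.pyGetD order ans 0 = order[ans.toNat] :=
      PySem.List.pyGetD_eq_getElem order 0 hans (by omega)
    set t := order[ans.toNat] with htdef
    have htmem : t ∈ s := hperm.mem_iff.mp (by rw [hdrop]; exact List.mem_cons_self)
    have hperm' : (order.drop (ans + 1).toNat).Perm (s.erase t) := by
      have h1 : (ans + 1).toNat = ans.toNat + 1 := by omega
      rw [h1]
      have h2 := hperm.erase t
      rw [hdrop, List.erase_cons_head] at h2
      exact h2
    have hnd : s.Nodup := hs.imp ne_of_lt
    have hback : PySem.List.pyGetD (rot s p) (-1) 0 = bPred s p := back_eq_bPred hs hpmem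
    by_cases h1 : t = p
    · -- pop front
      rw [rot_cons hs hpmem]
      simp only [loopA, loopB]
      rw [← rot_cons hs hpmem, hget, if_neg hsne, if_pos h1, if_pos h1]
      by_cases h2 : s.erase p = []
      · have hn0 : n = 0 := by
          have hle := List.length_erase_of_mem hpmem
          rw [h2] at hle; simp at hle; omega
        subst hn0
        have hs1 : s = [p] := by
          cases s with
          | nil => cases hsne rfl
          | cons a tl =>
            cases tl with
            | nil =>
              rcases List.mem_cons.mp hpmem with h' | h'
              · rw [h']
              · cases h'
            | cons b tl' => simp at hlen
        obtain ⟨f', rfl⟩ : ∃ f', f = f' + 1 := ⟨f - 1, by omega⟩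
        rw [if_pos h2, hs1]
        simp [loopA, loopB]
      · rw [if_neg h2, popFront hs hpmem h2]
        apply ih (s.erase p) (bSucc (s.erase p) p) (ans + 1) f
        · rw [List.length_erase_of_mem hpmem, hlen]; omega
        · exact hs.erase p
        · exact Or.inr (bSucc_mem h2)
        · omega
        · rw [← h1]; exact hperm'
        · omega
        · nlinarith
    · by_cases h2 : t = bPred s p
      · -- pop back
        have hbne : bPred s p ≠ p := by rw [← h2]; exact h1
        rw [rot_cons hs hpmem]
        simp only [loopA, loopB]
        rw [← rot_cons hs hpmem, hget, if_neg hsne, hback, if_neg h1, if_neg h1,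
            if_pos h2, if_pos h2]
        rw [popBack hs hpmem hbne, ← h2]
        apply ih (s.erase t) p (ans + 1) f
        · rw [List.length_erase_of_mem htmem, hlen]; omega
        · exact hs.erase t
        · exact Or.inr ((List.mem_erase_of_ne (Ne.symm h1)).mpr hpmem)
        · omega
        · exact hperm'
        · omega
        · nlinarith
      · by_cases h3 : p < t
        · -- rotate to t, then pop it
          set k := (s.filter (fun x => decide (p ≤ x) && decide (x < t))).length with hkdef
          have hkle : k ≤ n := by
            have hsub := List.filter_sublist (l := s) (p := fun x => decide (p ≤ x) && decide (x < t))
            have hne2 : s.filter (fun x => decide (p ≤ x) && decide (x < t)) ≠ s := by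
              intro heq
              have := List.of_mem_filter (heq ▸ htmem)
              simp at this
            have := lt_of_le_of_ne hsub.length_le (fun hl => hne2 (hsub.eq_of_length hl))
            omega
          have hkf : k + 1 ≤ f := by nlinarith
          rw [show f + 1 = (f - k) + k + 1 from by omega]
          rw [rotA order ans k (f - k) s p t hs hpmem htmem (le_of_lt h3) h2 hget rfl]
          have herase : s.erase t ≠ [] :=
            List.ne_nil_of_mem ((List.mem_erase_of_ne (Ne.symm h1)).mpr hpmem)
          obtain ⟨f', hf'⟩ : ∃ f', f - k = f' + 1 := ⟨f - k - 1, by omega⟩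
          rw [hf', rot_cons hs htmem]
          simp only [loopA, loopB]
          rw [← rot_cons hs htmem, hget, if_neg hsne, if_pos rfl, if_neg h1, if_neg h2,
              if_pos (show p < t ∧ t ∈ s from ⟨h3, htmem⟩)]
          rw [popFront hs htmem herase]
          have hknum : f = f' + 1 + k := by omega
          apply ih (s.erase t) (bSucc (s.erase t) t) (ans + 1) (f' + 1)
          · rw [List.length_erase_of_mem htmem, hlen]; omega
          · exact hs.erase t
          · exact Or.inr (bSucc_mem herase)
          · omega
          · exact hperm'
          · omega
          · nlinarith [hfuel, hkle, hknum]
        · -- break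
          rw [rot_cons hs hpmem]
          simp only [loopA, loopB]
          rw [← rot_cons hs hpmem, hget, if_neg hsne, hback, if_neg h1, if_neg h1,
              if_neg h2, if_neg h2, if_neg h3, if_neg (fun hc => h3 hc.1)]


-- ===== VERDICT (by name: the statement is the Claim_ definition above) =====
theorem solution_spec : Claim_equal_solution := by
  intro order _ hpre
  unfold Spec_solution
  unfold Pre_solution at hpre
  unfold solution solution_alt
  show loopA order (order.length * order.length + order.length + 1)
      (PySem.List.pyRange 1 ((order.length : Int) + 1) 1) 0 =
    loopB order order.length (PySem.List.pyRange 1 ((order.length : Int) + 1) 1) 1 0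
  set n := order.length with hn
  set s := PySem.List.pyRange 1 ((n : Int) + 1) 1 with hsdef
  have hsort : List.Pairwise (· < ·) s := PySem.List.pairwise_lt_pyRange_one 1 ((n : Int) + 1)
  have hlen : s.length = n := by
    rw [hsdef, PySem.List.length_pyRange_one]; omega
  have hge1 : ∀ x ∈ s, (1 : Int) ≤ x := by
    intro x hx
    exact ((PySem.List.mem_pyRange_one).mp (hsdef ▸ hx)).1
  have hrot : rot s 1 = s := by
    unfold rot
    have h1 : s.filter (fun x => decide ((1:Int) ≤ x)) = s := by
      apply List.filter_eq_self.mpr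
      intro x hx
      simpa using hge1 x hx
    have h2 : s.filter (fun x => decide (x < (1:Int))) = [] := by
      apply List.filter_eq_nil_iff.mpr
      intro x hx
      have := hge1 x hx
      simp only [decide_eq_true_eq, not_lt]
      omega
    rw [h1, h2]; simp
  rcases hpre with hperm | hhead
  · -- order is a permutation of 1..N: the two simulations run in lockstep
    have hp : s = [] ∨ (1 : Int) ∈ s := by
      by_cases h : n = 0
      · left; rw [← List.length_eq_zero_iff, hlen, h]
      · right
        rw [hsdef, PySem.List.mem_pyRange_one]
        omega
    conv_lhs => rw [← hrot]
    exact mainEq order n s 1 0 (n * n + n + 1) hlen hsort hp le_rfl (by simpa using hperm)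
      (by simp; exact hn) (by omega)
  · -- first request below box 1: both sides break out at once with 0
    cases horder : order with
    | nil => rw [horder] at hhead; simp at hhead
    | cons x rest =>
      have hx1 : x < 1 := by rw [horder] at hhead; simpa using hhead
      have hn1 : 1 ≤ n := by rw [hn, horder]; simp
      have hsne : s ≠ [] := by
        intro h
        rw [h] at hlen; simp at hlen; omega
      have h1mem : (1 : Int) ∈ s := by
        rw [hsdef, PySem.List.mem_pyRange_one]; omega
      have hget0 : PySem.List.pyGetD order 0 0 = x := by
        rw [horder]; exact PySem.List.pyGetD_zero_cons x rest 0
      have hbge : (1 : Int) ≤ bPred s 1 := hge1 _ (bPred_mem hsne)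
      have hback : PySem.List.pyGetD s (-1) 0 = bPred s 1 := by
        conv_lhs => rw [← hrot]
        exact back_eq_bPred hsort h1mem
      -- A: one iteration, all three tests fail; B likewise
      cases hscons : s with
      | nil => exact absurd hscons hsne
      | cons q qs =>
        have hq : q = 1 := by
          have hc : s.filter (fun y => decide ((1:Int) ≤ y)) = 1 :: s.filter (fun y => decide ((1:Int) < y)) :=
            filter_ge_eq_cons hsort h1mem
          have hr := hrot
          unfold rot at hr
          rw [hc] at hr
          have h2 : s.filter (fun y => decide (y < (1:Int))) = [] := by
            apply List.filter_eq_nil_iff.mpr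
            intro y hy
            have := hge1 y hy
            simp only [decide_eq_true_eq, not_lt]
            omega
          rw [h2, List.append_nil, hscons] at hr
          exact (List.cons.injEq _ _ _ _ ▸ hr).1.symm
        have hback2 : PySem.List.pyGetD (q :: qs) (-1) 0 = bPred (q :: qs) 1 := by
          rw [← hscons]; exact hback
        have hbge2 : (1 : Int) ≤ bPred (q :: qs) 1 := by
          rw [← hscons]; exact hbge
        obtain ⟨m, hm⟩ : ∃ m, n = m + 1 := ⟨n - 1, by omega⟩
        rw [hm]
        simp only [loopA, loopB]
        rw [show PySem.List.pyGetD (x :: rest) 0 0 = x from PySem.List.pyGetD_zero_cons x rest 0]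
        rw [if_neg (show ¬ (q :: qs) = [] by simp)]
        rw [if_neg (show ¬ x = q from by omega)]
        rw [hback2]
        rw [if_neg (show ¬ x = bPred (q :: qs) 1 from by omega)]
        rw [if_neg (show ¬ q < x from by omega)]
        rw [if_neg (show ¬ x = 1 from by omega)]
        rw [if_neg (show ¬ x = bPred (q :: qs) 1 from by omega)]
        rw [if_neg (show ¬ ((1:Int) < x ∧ x ∈ q :: qs) from fun hc => absurd hc.1 (by omega))]
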